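-- pv_equiv track=rewrite | github.com/MichaelCaraccio/Cryptographic-Algorithms | Python/DES/DES_Laville.py | createcd
-- ===== SOURCE A (Python) =====
-- __left_rotations = [
--     1, 1, 2, 2, 2, 2, 2, 2, 1, 2, 2, 2, 2, 2, 2, 1
-- ]
--
-- def createcd(cd0):
--     """
--     Crére le tableau C[0..17] ou D[0..17]
--     récupere le C[n-1] et aplique les shifts
--     :param cd0: C0 ou D0
--     :return: tableau C[0..17] ou D[0..17]
--     """
--     cds = [cd0] * 17
--     cds[0] = cd0
--     for i in range(1, 17):
--         cds[i] = cds[i - 1]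
--         for j in range(0, __left_rotations[i-1]):
--             cds[i] = leftShift(cds[i])
--     return cds
--
-- def leftShift(t):
--     """
--     Rotation à gauche des bytes
--     :param t: Tabelau a shifter
--     :return: Tableau shifté
--     """
--     return t[1:] + [t[0]]
-- ===== SOURCE B (Python) =====
-- __left_rotations = [
--     1, 1, 2, 2, 2, 2, 2, 2, 1, 2, 2, 2, 2, 2, 2, 1
-- ]
--
-- def createcd(cd0):
--     n = len(cd0)
--     offs = [0]
--     for r in __left_rotations:
--         offs.append(offs[-1] + r)
--     return [cd0[o % n:] + cd0[:o % n] for o in offs]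
-- ===== Notes on version B (the rewrite author's own statement) =====
-- stated objective: alternative
-- what changed: B computes the 17 cumulative rotation offsets as prefix sums of __left_rotations and builds each entry directly from cd0 by one slice-and-concatenate at offset mod len(cd0), instead of A's chain of repeated one-element left shifts carried from the previous entry.
import Mathlib
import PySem

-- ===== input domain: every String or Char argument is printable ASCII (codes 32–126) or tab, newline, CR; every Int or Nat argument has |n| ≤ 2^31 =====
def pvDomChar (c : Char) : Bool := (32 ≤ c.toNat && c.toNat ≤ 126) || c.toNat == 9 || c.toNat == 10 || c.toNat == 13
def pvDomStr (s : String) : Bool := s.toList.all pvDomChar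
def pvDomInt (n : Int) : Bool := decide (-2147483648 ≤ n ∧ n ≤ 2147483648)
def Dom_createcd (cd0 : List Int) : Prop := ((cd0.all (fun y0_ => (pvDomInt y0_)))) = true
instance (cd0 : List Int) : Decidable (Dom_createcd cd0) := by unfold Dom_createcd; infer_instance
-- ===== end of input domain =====

-- B builds each of the 17 entries directly from cd0 by slicing at the prefix-sum
-- rotation offset (mod len), instead of A's chain of repeated one-step left shifts.

-- __left_rotations, the module constant shared by both implementations
def pyLeftRotations : List Int := [1, 1, 2, 2, 2, 2, 2, 2, 1, 2, 2, 2, 2, 2, 2, 1]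

-- ===== PORT A =====
-- leftShift(t) = t[1:] + [t[0]]; t[0] written as t.headI, exact for t ≠ [] (Pre_ rules out [])
def leftShiftA (t : List Int) : List Int := PySem.List.slice t (some 1) none ++ [t.headI]

-- body of the `for i in range(1, 17)` loop: cds[i] = cds[i-1] shifted __left_rotations[i-1] times
def createcdStep (cds : List (List Int)) (i : Int) : List (List Int) :=
  let v := (PySem.List.pyRange 0 (PySem.List.pyGetD pyLeftRotations (i - 1) 0) 1).foldl
    (fun t _ => leftShiftA t) (PySem.List.pyGetD cds (i - 1) [])
  PySem.List.pySetD cds i v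

def createcd (cd0 : List Int) : List (List Int) :=
  (PySem.List.pyRange 1 17 1).foldl createcdStep (List.replicate 17 cd0)

-- ===== PORT B =====
def createcd_alt (cd0 : List Int) : List (List Int) :=
  let n : Int := cd0.length
  let offs := pyLeftRotations.foldl
    (fun offs r => offs ++ [PySem.List.pyGetD offs (-1) 0 + r]) [(0 : Int)]
  offs.map (fun o =>
    PySem.List.slice cd0 (some (PySem.Int.mod o n)) none ++
    PySem.List.slice cd0 none (some (PySem.Int.mod o n)))

-- ===== PRECONDITION & SPEC =====
-- Pre_ excludes only the empty list, on which Python A raises IndexError (t[0] in leftShift).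
def Pre_createcd (cd0 : List Int) : Prop := cd0 ≠ []
instance (cd0 : List Int) : Decidable (Pre_createcd cd0) := by unfold Pre_createcd; infer_instance
def pvWitness_createcd : List Int := [1, 0, 1]

def Spec_createcd (cd0 : List Int) (out : List (List Int)) : Prop := out = createcd_alt cd0
instance (cd0 : List Int) (out : List (List Int)) : Decidable (Spec_createcd cd0 out) := by unfold Spec_createcd; infer_instance

-- ===== CLAIM (what is proved, stated in full; the proofs are below) =====
def Claim_equal_createcd : Prop := ∀ (cd0 : List Int), Dom_createcd cd0 → Pre_createcd cd0 → Spec_createcd cd0 (createcd cd0)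

-- ===== LEMMAS AND PROOFS =====
lemma ls_rot1 (t : List Int) (h : t ≠ []) : leftShiftA t = t.rotate 1 := by
  cases t with
  | nil => exact absurd rfl h
  | cons a as =>
    simp [leftShiftA, PySem.List.slice_from_one, List.rotate_cons_succ]

lemma ls_rot (cd0 : List Int) (h : cd0 ≠ []) (n : Nat) :
    leftShiftA (cd0.rotate n) = cd0.rotate (n + 1) := by
  rw [ls_rot1 (cd0.rotate n) (by simpa using h), List.rotate_rotate]

lemma rot_slice (cd0 : List Int) (h : cd0 ≠ []) (k : Nat) :
    PySem.List.slice cd0 (some (PySem.Int.mod (k : Int) (cd0.length : Int))) none ++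
      PySem.List.slice cd0 none (some (PySem.Int.mod (k : Int) (cd0.length : Int))) =
    cd0.rotate k := by
  have hlen : 0 < cd0.length := List.length_pos_iff.mpr h
  rw [PySem.Int.mod_natCast, PySem.List.slice_from_natCast, PySem.List.slice_to_natCast,
    ← List.rotate_mod, List.rotate_eq_drop_append_take (le_of_lt (Nat.mod_lt _ hlen))]

set_option maxRecDepth 4000 in
set_option maxHeartbeats 40000000 in
lemma A_eq (cd0 : List Int) (h : cd0 ≠ []) : createcd cd0 = [cd0, cd0.rotate 1, cd0.rotate 2, cd0.rotate 4, cd0.rotate 6, cd0.rotate 8, cd0.rotate 10, cd0.rotate 12, cd0.rotate 14, cd0.rotate 15, cd0.rotate 17, cd0.rotate 19, cd0.rotate 21, cd0.rotate 23, cd0.rotate 25, cd0.rotate 27, cd0.rotate 28] := by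
  have hls0 : leftShiftA cd0 = cd0.rotate 1 := ls_rot1 cd0 h
  have hr : PySem.List.pyRange 1 17 1 = [1, 2, 3, 4, 5, 6, 7, 8, 9, 10, 11, 12, 13, 14, 15, 16] := by decide
  have hrep : List.replicate 17 cd0 = [cd0, cd0, cd0, cd0, cd0, cd0, cd0, cd0, cd0, cd0, cd0, cd0, cd0, cd0, cd0, cd0, cd0] := rfl
  have e1 : createcdStep [cd0, cd0, cd0, cd0, cd0, cd0, cd0, cd0, cd0, cd0, cd0, cd0, cd0, cd0, cd0, cd0, cd0] 1 = [cd0, cd0.rotate 1, cd0, cd0, cd0, cd0, cd0, cd0, cd0, cd0, cd0, cd0, cd0, cd0, cd0, cd0, cd0] := by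
    simp only [createcdStep,
      (by decide : PySem.List.pyGetD pyLeftRotations (1 - 1) 0 = 1),
      (by decide : PySem.List.pyRange 0 1 1 = [0])]
    norm_num [PySem.List.pyGetD, PySem.List.pyIdx?, List.set, hls0, ls_rot cd0 h,
      PySem.List.pySetD_of_nonneg, (by decide : Int.toNat (1 : Int) = 1),
      (by decide : Int.toNat (0 : Int) = 0)]
  have e2 : createcdStep [cd0, cd0.rotate 1, cd0, cd0, cd0, cd0, cd0, cd0, cd0, cd0, cd0, cd0, cd0, cd0, cd0, cd0, cd0] 2 = [cd0, cd0.rotate 1, cd0.rotate 2, cd0, cd0, cd0, cd0, cd0, cd0, cd0, cd0, cd0, cd0, cd0, cd0, cd0, cd0] := by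
    simp only [createcdStep,
      (by decide : PySem.List.pyGetD pyLeftRotations (2 - 1) 0 = 1),
      (by decide : PySem.List.pyRange 0 1 1 = [0])]
    norm_num [PySem.List.pyGetD, PySem.List.pyIdx?, List.set, hls0, ls_rot cd0 h,
      PySem.List.pySetD_of_nonneg, (by decide : Int.toNat (2 : Int) = 2),
      (by decide : Int.toNat (1 : Int) = 1)]
  have e3 : createcdStep [cd0, cd0.rotate 1, cd0.rotate 2, cd0, cd0, cd0, cd0, cd0, cd0, cd0, cd0, cd0, cd0, cd0, cd0, cd0, cd0] 3 = [cd0, cd0.rotate 1, cd0.rotate 2, cd0.rotate 4, cd0, cd0, cd0, cd0, cd0, cd0, cd0, cd0, cd0, cd0, cd0, cd0, cd0] := by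
    simp only [createcdStep,
      (by decide : PySem.List.pyGetD pyLeftRotations (3 - 1) 0 = 2),
      (by decide : PySem.List.pyRange 0 2 1 = [0, 1])]
    norm_num [PySem.List.pyGetD, PySem.List.pyIdx?, List.set, hls0, ls_rot cd0 h,
      PySem.List.pySetD_of_nonneg, (by decide : Int.toNat (3 : Int) = 3),
      (by decide : Int.toNat (2 : Int) = 2)]
  have e4 : createcdStep [cd0, cd0.rotate 1, cd0.rotate 2, cd0.rotate 4, cd0, cd0, cd0, cd0, cd0, cd0, cd0, cd0, cd0, cd0, cd0, cd0, cd0] 4 = [cd0, cd0.rotate 1, cd0.rotate 2, cd0.rotate 4, cd0.rotate 6, cd0, cd0, cd0, cd0, cd0, cd0, cd0, cd0, cd0, cd0, cd0, cd0] := by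
    simp only [createcdStep,
      (by decide : PySem.List.pyGetD pyLeftRotations (4 - 1) 0 = 2),
      (by decide : PySem.List.pyRange 0 2 1 = [0, 1])]
    norm_num [PySem.List.pyGetD, PySem.List.pyIdx?, List.set, hls0, ls_rot cd0 h,
      PySem.List.pySetD_of_nonneg, (by decide : Int.toNat (4 : Int) = 4),
      (by decide : Int.toNat (3 : Int) = 3)]
  have e5 : createcdStep [cd0, cd0.rotate 1, cd0.rotate 2, cd0.rotate 4, cd0.rotate 6, cd0, cd0, cd0, cd0, cd0, cd0, cd0, cd0, cd0, cd0, cd0, cd0] 5 = [cd0, cd0.rotate 1, cd0.rotate 2, cd0.rotate 4, cd0.rotate 6, cd0.rotate 8, cd0, cd0, cd0, cd0, cd0, cd0, cd0, cd0, cd0, cd0, cd0] := by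
    simp only [createcdStep,
      (by decide : PySem.List.pyGetD pyLeftRotations (5 - 1) 0 = 2),
      (by decide : PySem.List.pyRange 0 2 1 = [0, 1])]
    norm_num [PySem.List.pyGetD, PySem.List.pyIdx?, List.set, hls0, ls_rot cd0 h,
      PySem.List.pySetD_of_nonneg, (by decide : Int.toNat (5 : Int) = 5),
      (by decide : Int.toNat (4 : Int) = 4)]
  have e6 : createcdStep [cd0, cd0.rotate 1, cd0.rotate 2, cd0.rotate 4, cd0.rotate 6, cd0.rotate 8, cd0, cd0, cd0, cd0, cd0, cd0, cd0, cd0, cd0, cd0, cd0] 6 = [cd0, cd0.rotate 1, cd0.rotate 2, cd0.rotate 4, cd0.rotate 6, cd0.rotate 8, cd0.rotate 10, cd0, cd0, cd0, cd0, cd0, cd0, cd0, cd0, cd0, cd0] := by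
    simp only [createcdStep,
      (by decide : PySem.List.pyGetD pyLeftRotations (6 - 1) 0 = 2),
      (by decide : PySem.List.pyRange 0 2 1 = [0, 1])]
    norm_num [PySem.List.pyGetD, PySem.List.pyIdx?, List.set, hls0, ls_rot cd0 h,
      PySem.List.pySetD_of_nonneg, (by decide : Int.toNat (6 : Int) = 6),
      (by decide : Int.toNat (5 : Int) = 5)]
  have e7 : createcdStep [cd0, cd0.rotate 1, cd0.rotate 2, cd0.rotate 4, cd0.rotate 6, cd0.rotate 8, cd0.rotate 10, cd0, cd0, cd0, cd0, cd0, cd0, cd0, cd0, cd0, cd0] 7 = [cd0, cd0.rotate 1, cd0.rotate 2, cd0.rotate 4, cd0.rotate 6, cd0.rotate 8, cd0.rotate 10, cd0.rotate 12, cd0, cd0, cd0, cd0, cd0, cd0, cd0, cd0, cd0] := by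
    simp only [createcdStep,
      (by decide : PySem.List.pyGetD pyLeftRotations (7 - 1) 0 = 2),
      (by decide : PySem.List.pyRange 0 2 1 = [0, 1])]
    norm_num [PySem.List.pyGetD, PySem.List.pyIdx?, List.set, hls0, ls_rot cd0 h,
      PySem.List.pySetD_of_nonneg, (by decide : Int.toNat (7 : Int) = 7),
      (by decide : Int.toNat (6 : Int) = 6)]
  have e8 : createcdStep [cd0, cd0.rotate 1, cd0.rotate 2, cd0.rotate 4, cd0.rotate 6, cd0.rotate 8, cd0.rotate 10, cd0.rotate 12, cd0, cd0, cd0, cd0, cd0, cd0, cd0, cd0, cd0] 8 = [cd0, cd0.rotate 1, cd0.rotate 2, cd0.rotate 4, cd0.rotate 6, cd0.rotate 8, cd0.rotate 10, cd0.rotate 12, cd0.rotate 14, cd0, cd0, cd0, cd0, cd0, cd0, cd0, cd0] := by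
    simp only [createcdStep,
      (by decide : PySem.List.pyGetD pyLeftRotations (8 - 1) 0 = 2),
      (by decide : PySem.List.pyRange 0 2 1 = [0, 1])]
    norm_num [PySem.List.pyGetD, PySem.List.pyIdx?, List.set, hls0, ls_rot cd0 h,
      PySem.List.pySetD_of_nonneg, (by decide : Int.toNat (8 : Int) = 8),
      (by decide : Int.toNat (7 : Int) = 7)]
  have e9 : createcdStep [cd0, cd0.rotate 1, cd0.rotate 2, cd0.rotate 4, cd0.rotate 6, cd0.rotate 8, cd0.rotate 10, cd0.rotate 12, cd0.rotate 14, cd0, cd0, cd0, cd0, cd0, cd0, cd0, cd0] 9 = [cd0, cd0.rotate 1, cd0.rotate 2, cd0.rotate 4, cd0.rotate 6, cd0.rotate 8, cd0.rotate 10, cd0.rotate 12, cd0.rotate 14, cd0.rotate 15, cd0, cd0, cd0, cd0, cd0, cd0, cd0] := by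
    simp only [createcdStep,
      (by decide : PySem.List.pyGetD pyLeftRotations (9 - 1) 0 = 1),
      (by decide : PySem.List.pyRange 0 1 1 = [0])]
    norm_num [PySem.List.pyGetD, PySem.List.pyIdx?, List.set, hls0, ls_rot cd0 h,
      PySem.List.pySetD_of_nonneg, (by decide : Int.toNat (9 : Int) = 9),
      (by decide : Int.toNat (8 : Int) = 8)]
  have e10 : createcdStep [cd0, cd0.rotate 1, cd0.rotate 2, cd0.rotate 4, cd0.rotate 6, cd0.rotate 8, cd0.rotate 10, cd0.rotate 12, cd0.rotate 14, cd0.rotate 15, cd0, cd0, cd0, cd0, cd0, cd0, cd0] 10 = [cd0, cd0.rotate 1, cd0.rotate 2, cd0.rotate 4, cd0.rotate 6, cd0.rotate 8, cd0.rotate 10, cd0.rotate 12, cd0.rotate 14, cd0.rotate 15, cd0.rotate 17, cd0, cd0, cd0, cd0, cd0, cd0] := by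
    simp only [createcdStep,
      (by decide : PySem.List.pyGetD pyLeftRotations (10 - 1) 0 = 2),
      (by decide : PySem.List.pyRange 0 2 1 = [0, 1])]
    norm_num [PySem.List.pyGetD, PySem.List.pyIdx?, List.set, hls0, ls_rot cd0 h,
      PySem.List.pySetD_of_nonneg, (by decide : Int.toNat (10 : Int) = 10),
      (by decide : Int.toNat (9 : Int) = 9)]
  have e11 : createcdStep [cd0, cd0.rotate 1, cd0.rotate 2, cd0.rotate 4, cd0.rotate 6, cd0.rotate 8, cd0.rotate 10, cd0.rotate 12, cd0.rotate 14, cd0.rotate 15, cd0.rotate 17, cd0, cd0, cd0, cd0, cd0, cd0] 11 = [cd0, cd0.rotate 1, cd0.rotate 2, cd0.rotate 4, cd0.rotate 6, cd0.rotate 8, cd0.rotate 10, cd0.rotate 12, cd0.rotate 14, cd0.rotate 15, cd0.rotate 17, cd0.rotate 19, cd0, cd0, cd0, cd0, cd0] := by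
    simp only [createcdStep,
      (by decide : PySem.List.pyGetD pyLeftRotations (11 - 1) 0 = 2),
      (by decide : PySem.List.pyRange 0 2 1 = [0, 1])]
    norm_num [PySem.List.pyGetD, PySem.List.pyIdx?, List.set, hls0, ls_rot cd0 h,
      PySem.List.pySetD_of_nonneg, (by decide : Int.toNat (11 : Int) = 11),
      (by decide : Int.toNat (10 : Int) = 10)]
  have e12 : createcdStep [cd0, cd0.rotate 1, cd0.rotate 2, cd0.rotate 4, cd0.rotate 6, cd0.rotate 8, cd0.rotate 10, cd0.rotate 12, cd0.rotate 14, cd0.rotate 15, cd0.rotate 17, cd0.rotate 19, cd0, cd0, cd0, cd0, cd0] 12 = [cd0, cd0.rotate 1, cd0.rotate 2, cd0.rotate 4, cd0.rotate 6, cd0.rotate 8, cd0.rotate 10, cd0.rotate 12, cd0.rotate 14, cd0.rotate 15, cd0.rotate 17, cd0.rotate 19, cd0.rotate 21, cd0, cd0, cd0, cd0] := by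
    simp only [createcdStep,
      (by decide : PySem.List.pyGetD pyLeftRotations (12 - 1) 0 = 2),
      (by decide : PySem.List.pyRange 0 2 1 = [0, 1])]
    norm_num [PySem.List.pyGetD, PySem.List.pyIdx?, List.set, hls0, ls_rot cd0 h,
      PySem.List.pySetD_of_nonneg, (by decide : Int.toNat (12 : Int) = 12),
      (by decide : Int.toNat (11 : Int) = 11)]
  have e13 : createcdStep [cd0, cd0.rotate 1, cd0.rotate 2, cd0.rotate 4, cd0.rotate 6, cd0.rotate 8, cd0.rotate 10, cd0.rotate 12, cd0.rotate 14, cd0.rotate 15, cd0.rotate 17, cd0.rotate 19, cd0.rotate 21, cd0, cd0, cd0, cd0] 13 = [cd0, cd0.rotate 1, cd0.rotate 2, cd0.rotate 4, cd0.rotate 6, cd0.rotate 8, cd0.rotate 10, cd0.rotate 12, cd0.rotate 14, cd0.rotate 15, cd0.rotate 17, cd0.rotate 19, cd0.rotate 21, cd0.rotate 23, cd0, cd0, cd0] := by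
    simp only [createcdStep,
      (by decide : PySem.List.pyGetD pyLeftRotations (13 - 1) 0 = 2),
      (by decide : PySem.List.pyRange 0 2 1 = [0, 1])]
    norm_num [PySem.List.pyGetD, PySem.List.pyIdx?, List.set, hls0, ls_rot cd0 h,
      PySem.List.pySetD_of_nonneg, (by decide : Int.toNat (13 : Int) = 13),
      (by decide : Int.toNat (12 : Int) = 12)]
  have e14 : createcdStep [cd0, cd0.rotate 1, cd0.rotate 2, cd0.rotate 4, cd0.rotate 6, cd0.rotate 8, cd0.rotate 10, cd0.rotate 12, cd0.rotate 14, cd0.rotate 15, cd0.rotate 17, cd0.rotate 19, cd0.rotate 21, cd0.rotate 23, cd0, cd0, cd0] 14 = [cd0, cd0.rotate 1, cd0.rotate 2, cd0.rotate 4, cd0.rotate 6, cd0.rotate 8, cd0.rotate 10, cd0.rotate 12, cd0.rotate 14, cd0.rotate 15, cd0.rotate 17, cd0.rotate 19, cd0.rotate 21, cd0.rotate 23, cd0.rotate 25, cd0, cd0] := by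
    simp only [createcdStep,
      (by decide : PySem.List.pyGetD pyLeftRotations (14 - 1) 0 = 2),
      (by decide : PySem.List.pyRange 0 2 1 = [0, 1])]
    norm_num [PySem.List.pyGetD, PySem.List.pyIdx?, List.set, hls0, ls_rot cd0 h,
      PySem.List.pySetD_of_nonneg, (by decide : Int.toNat (14 : Int) = 14),
      (by decide : Int.toNat (13 : Int) = 13)]
  have e15 : createcdStep [cd0, cd0.rotate 1, cd0.rotate 2, cd0.rotate 4, cd0.rotate 6, cd0.rotate 8, cd0.rotate 10, cd0.rotate 12, cd0.rotate 14, cd0.rotate 15, cd0.rotate 17, cd0.rotate 19, cd0.rotate 21, cd0.rotate 23, cd0.rotate 25, cd0, cd0] 15 = [cd0, cd0.rotate 1, cd0.rotate 2, cd0.rotate 4, cd0.rotate 6, cd0.rotate 8, cd0.rotate 10, cd0.rotate 12, cd0.rotate 14, cd0.rotate 15, cd0.rotate 17, cd0.rotate 19, cd0.rotate 21, cd0.rotate 23, cd0.rotate 25, cd0.rotate 27, cd0] := by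
    simp only [createcdStep,
      (by decide : PySem.List.pyGetD pyLeftRotations (15 - 1) 0 = 2),
      (by decide : PySem.List.pyRange 0 2 1 = [0, 1])]
    norm_num [PySem.List.pyGetD, PySem.List.pyIdx?, List.set, hls0, ls_rot cd0 h,
      PySem.List.pySetD_of_nonneg, (by decide : Int.toNat (15 : Int) = 15),
      (by decide : Int.toNat (14 : Int) = 14)]
  have e16 : createcdStep [cd0, cd0.rotate 1, cd0.rotate 2, cd0.rotate 4, cd0.rotate 6, cd0.rotate 8, cd0.rotate 10, cd0.rotate 12, cd0.rotate 14, cd0.rotate 15, cd0.rotate 17, cd0.rotate 19, cd0.rotate 21, cd0.rotate 23, cd0.rotate 25, cd0.rotate 27, cd0] 16 = [cd0, cd0.rotate 1, cd0.rotate 2, cd0.rotate 4, cd0.rotate 6, cd0.rotate 8, cd0.rotate 10, cd0.rotate 12, cd0.rotate 14, cd0.rotate 15, cd0.rotate 17, cd0.rotate 19, cd0.rotate 21, cd0.rotate 23, cd0.rotate 25, cd0.rotate 27, cd0.rotate 28] := by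
    simp only [createcdStep,
      (by decide : PySem.List.pyGetD pyLeftRotations (16 - 1) 0 = 1),
      (by decide : PySem.List.pyRange 0 1 1 = [0])]
    norm_num [PySem.List.pyGetD, PySem.List.pyIdx?, List.set, hls0, ls_rot cd0 h,
      PySem.List.pySetD_of_nonneg, (by decide : Int.toNat (16 : Int) = 16),
      (by decide : Int.toNat (15 : Int) = 15)]
  unfold createcd
  rw [hr, hrep, List.foldl_cons, e1, List.foldl_cons, e2, List.foldl_cons, e3, List.foldl_cons,
    e4, List.foldl_cons, e5, List.foldl_cons, e6, List.foldl_cons, e7, List.foldl_cons, e8,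
    List.foldl_cons, e9, List.foldl_cons, e10, List.foldl_cons, e11, List.foldl_cons, e12,
    List.foldl_cons, e13, List.foldl_cons, e14, List.foldl_cons, e15, List.foldl_cons, e16,
    List.foldl_nil]

set_option maxRecDepth 4000 in
set_option maxHeartbeats 1000000 in
lemma B_eq (cd0 : List Int) (h : cd0 ≠ []) : createcd_alt cd0 = [cd0, cd0.rotate 1, cd0.rotate 2, cd0.rotate 4, cd0.rotate 6, cd0.rotate 8, cd0.rotate 10, cd0.rotate 12, cd0.rotate 14, cd0.rotate 15, cd0.rotate 17, cd0.rotate 19, cd0.rotate 21, cd0.rotate 23, cd0.rotate 25, cd0.rotate 27, cd0.rotate 28] := by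
  have hoffs : pyLeftRotations.foldl
      (fun offs r => offs ++ [PySem.List.pyGetD offs (-1) 0 + r]) [(0 : Int)] =
      [0, 1, 2, 4, 6, 8, 10, 12, 14, 15, 17, 19, 21, 23, 25, 27, 28] := by decide
  simp only [createcd_alt, hoffs, List.map, List.cons.injEq, and_true]
  refine ⟨by simpa using rot_slice cd0 h 0,
    by exact_mod_cast rot_slice cd0 h 1,
    by exact_mod_cast rot_slice cd0 h 2,
    by exact_mod_cast rot_slice cd0 h 4,
    by exact_mod_cast rot_slice cd0 h 6,
    by exact_mod_cast rot_slice cd0 h 8,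
    by exact_mod_cast rot_slice cd0 h 10,
    by exact_mod_cast rot_slice cd0 h 12,
    by exact_mod_cast rot_slice cd0 h 14,
    by exact_mod_cast rot_slice cd0 h 15,
    by exact_mod_cast rot_slice cd0 h 17,
    by exact_mod_cast rot_slice cd0 h 19,
    by exact_mod_cast rot_slice cd0 h 21,
    by exact_mod_cast rot_slice cd0 h 23,
    by exact_mod_cast rot_slice cd0 h 25,
    by exact_mod_cast rot_slice cd0 h 27,
    by exact_mod_cast rot_slice cd0 h 28⟩

-- ===== VERDICT (by name: the statement is the Claim_ definition above) =====
theorem createcd_spec : Claim_equal_createcd := by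
  intro cd0 _ hpre
  unfold Spec_createcd
  rw [A_eq cd0 hpre, B_eq cd0 hpre]
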